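-- pv_equiv track=rewrite | github.com/Luis-Eduardo-Rodriguez-Chavez/saas-csv-analytics | backend/main.py | pick_primary_metric
-- ===== SOURCE A (Python) =====
-- from typing import Any, Dict, List, Optional, Tuple
--
-- def pick_primary_metric(numeric_cols: List[str]) -> Optional[str]:
--     preferred = [
--         "revenue_usd",
--         "revenue",
--         "sales",
--         "amount",
--         "total",
--         "orders",
--         "units_sold",
--         "profit",
--     ]
--     lower_map = {c.lower(): c for c in numeric_cols}
--     for p in preferred:
--         if p in lower_map:
--             return lower_map[p]
--     return numeric_cols[0] if numeric_cols else None
-- ===== SOURCE B (Python) =====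
-- def pick_primary_metric(numeric_cols):
--     preferred = [
--         "revenue_usd",
--         "revenue",
--         "sales",
--         "amount",
--         "total",
--         "orders",
--         "units_sold",
--         "profit",
--     ]
--     # Single pass: keep the column whose lowercased name ranks best in `preferred`.
--     best = None
--     best_rank = len(preferred)
--     for c in numeric_cols:
--         lc = c.lower()
--         rank = preferred.index(lc) if lc in preferred else len(preferred)
--         if rank <= best_rank:
--             best, best_rank = c, rank
--     if best_rank < len(preferred):
--         return best
--     return numeric_cols[0] if numeric_cols else None
-- ===== Notes on version B (the rewrite author's own statement) =====
-- stated objective: alternative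
-- what changed: B makes one pass over the columns computing the argmin of each column's rank in the fixed preference list (keeping the later column on equal rank), instead of building a lowercased lookup map and probing it once per preferred name.
import Mathlib
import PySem

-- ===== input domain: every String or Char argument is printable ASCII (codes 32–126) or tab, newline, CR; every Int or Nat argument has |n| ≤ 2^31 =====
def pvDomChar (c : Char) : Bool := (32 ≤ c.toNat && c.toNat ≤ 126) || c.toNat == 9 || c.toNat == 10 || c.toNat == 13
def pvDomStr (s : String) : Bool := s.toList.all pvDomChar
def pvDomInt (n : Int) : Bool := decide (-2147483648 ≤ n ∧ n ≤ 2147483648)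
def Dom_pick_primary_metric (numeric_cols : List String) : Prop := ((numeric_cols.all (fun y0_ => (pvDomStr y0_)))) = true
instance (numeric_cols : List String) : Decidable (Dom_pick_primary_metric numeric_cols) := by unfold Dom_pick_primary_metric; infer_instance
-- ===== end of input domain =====

-- B replaces A's lowercase→column map + probe-per-preferred-name by a single argmin pass over the columns (alternative decomposition, same behaviour).


-- ===== PORT A =====
def pvPreferred : List String :=
  ["revenue_usd", "revenue", "sales", "amount", "total", "orders", "units_sold", "profit"]

-- the dict-comprehension body: insert c under its lowercased name
def pvInsA (d : PySem.Dict String String) (c : String) : PySem.Dict String String :=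
  d.insert (PySem.Str.lower c) c

-- the for-loop over preferred: the first p present in the dict wins (early return as Option)
def pvLoopA (m : PySem.Dict String String) : List String → Option String
  | [] => none
  | p :: ps => if m.contains p then m.get? p else pvLoopA m ps

def pick_primary_metric (numeric_cols : List String) : Option String :=
  let lower_map : PySem.Dict String String := numeric_cols.foldl pvInsA PySem.Dict.empty
  match pvLoopA lower_map pvPreferred with
  | some v => some v
  | none => if numeric_cols ≠ [] then numeric_cols.head? else none

-- ===== PORT B =====
-- loop body: rank the column's lowercased name in pvPreferred, keep it if its rank is ≤ the best so far
-- ('preferred.index(lc) if lc in preferred else len(preferred)': the membership guard makes index? a some, so getD's default is never used)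
def pvStepB (st : Option String × Nat) (c : String) : Option String × Nat :=
  let lc := PySem.Str.lower c
  let rank := if pvPreferred.contains lc then (PySem.List.index? pvPreferred lc).getD pvPreferred.length
              else pvPreferred.length
  if rank ≤ st.2 then (some c, rank) else st

def pick_primary_metric_alt (numeric_cols : List String) : Option String :=
  let st := numeric_cols.foldl pvStepB (none, pvPreferred.length)
  if st.2 < pvPreferred.length then st.1
  else if numeric_cols ≠ [] then numeric_cols.head? else none

-- ===== PRECONDITION & SPEC =====
def Spec_pick_primary_metric (numeric_cols : List String) (out : Option String) : Prop := out = pick_primary_metric_alt numeric_cols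
instance (numeric_cols : List String) (out : Option String) : Decidable (Spec_pick_primary_metric numeric_cols out) := by unfold Spec_pick_primary_metric; infer_instance

-- ===== CLAIM (what is proved, stated in full; the proofs are below) =====
def Claim_equal_pick_primary_metric : Prop := ∀ (numeric_cols : List String), Dom_pick_primary_metric numeric_cols → Spec_pick_primary_metric numeric_cols (pick_primary_metric numeric_cols)

-- ===== LEMMAS AND PROOFS =====

-- B's rank of a lowercased name = first index of an equal element of pvPreferred (length if absent)
lemma pv_rank_eq (lc : String) :
    (if pvPreferred.contains lc then (PySem.List.index? pvPreferred lc).getD pvPreferred.length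
     else pvPreferred.length)
      = pvPreferred.findIdx (fun p => p == lc) := by
  rw [List.findIdx_eq_getD_findIdx?, PySem.List.index?_eq_idxOf?]
  by_cases h : lc ∈ pvPreferred
  · simp [h, List.idxOf?]
  · have hn : List.findIdx? (fun p => p == lc) pvPreferred = none := by
      rw [List.findIdx?_eq_none_iff]
      intro x hx
      simp only [beq_eq_false_iff_ne]
      rintro rfl; exact h hx
    simp [h, hn]

-- findIdx of a disjunction of predicates is the min of the findIdx's
lemma pv_findIdx_or {α : Type} (p q : α → Bool) (l : List α) :
    List.findIdx (fun x => p x || q x) l = min (List.findIdx p l) (List.findIdx q l) := by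
  induction l with
  | nil => rfl
  | cons a l ih =>
    simp only [List.findIdx_cons, ih]
    cases hp : p a <;> cases hq : q a <;> simp

-- A's loop = lookup at the first preferred name the dict contains
lemma pv_loopA_eq (ps : List String) (m : PySem.Dict String String) :
    pvLoopA m ps
      = match ps[ps.findIdx m.contains]? with
        | some p => m.get? p
        | none => none := by
  induction ps with
  | nil => rfl
  | cons p ps ih =>
    simp only [pvLoopA, List.findIdx_cons]
    cases h : m.contains p
    · simpa [h] using ih
    · simp

-- one step of B simulates one insertion of A
lemma pv_step_sim (d : PySem.Dict String String) (st : Option String × Nat) (c : String)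
    (h1 : st.2 = pvPreferred.findIdx d.contains)
    (h2 : st.2 < pvPreferred.length → st.1 = d.get? (pvPreferred.getD st.2 "")) :
    (pvStepB st c).2 = pvPreferred.findIdx (pvInsA d c).contains ∧
    ((pvStepB st c).2 < pvPreferred.length →
      (pvStepB st c).1 = (pvInsA d c).get? (pvPreferred.getD (pvStepB st c).2 "")) := by
  have hcont : (pvInsA d c).contains = fun p => (p == PySem.Str.lower c || d.contains p) :=
    funext fun p => PySem.Dict.contains_insert d (PySem.Str.lower c) p c
  have hfind : pvPreferred.findIdx (pvInsA d c).contains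
      = min (pvPreferred.findIdx (fun p => p == PySem.Str.lower c)) (pvPreferred.findIdx d.contains) := by
    rw [hcont, pv_findIdx_or]
  set lc := PySem.Str.lower c with hlc
  set r := pvPreferred.findIdx (fun p => p == lc) with hrdef
  have hstep : pvStepB st c = if r ≤ st.2 then (some c, r) else st := by
    simp only [pvStepB, pv_rank_eq, ← hlc, ← hrdef]
  by_cases hle : r ≤ st.2
  · rw [hstep, if_pos hle]
    constructor
    · simp only [hfind, ← h1]; omega
    · intro hr
      have hkey : pvPreferred.getD r "" = lc := by
        have hlen : r < pvPreferred.length := hr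
        have := List.findIdx_getElem (p := fun p => p == lc) (xs := pvPreferred)
          (w := hlen)
        rw [List.getD_eq_getElem _ _ hlen]
        exact eq_of_beq this
      rw [hkey, pvInsA, PySem.Dict.get?_insert_self]
  · rw [hstep, if_neg hle]
    push Not at hle
    constructor
    · simp only [hfind, ← h1]; omega
    · intro hr
      have hkey_ne : pvPreferred.getD st.2 "" ≠ lc := by
        intro heq
        have hlen : st.2 < pvPreferred.length := hr
        rw [List.getD_eq_getElem _ _ hlen] at heq
        have : (fun p => p == lc) pvPreferred[st.2] = false :=
          List.not_of_lt_findIdx (by omega : st.2 < pvPreferred.findIdx (fun p => p == lc))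
        simp [heq] at this
      rw [pvInsA, PySem.Dict.get?_insert_of_ne d c hkey_ne]
      exact h2 hr

-- the whole loops: B's fold simulates A's dict build
lemma pv_fold_sim (cols : List String) (d : PySem.Dict String String) (st : Option String × Nat)
    (h1 : st.2 = pvPreferred.findIdx d.contains)
    (h2 : st.2 < pvPreferred.length → st.1 = d.get? (pvPreferred.getD st.2 "")) :
    (cols.foldl pvStepB st).2 = pvPreferred.findIdx ((cols.foldl pvInsA d).contains) ∧
    ((cols.foldl pvStepB st).2 < pvPreferred.length →
      (cols.foldl pvStepB st).1
        = (cols.foldl pvInsA d).get? (pvPreferred.getD (cols.foldl pvStepB st).2 "")) := by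
  induction cols generalizing d st with
  | nil => exact ⟨h1, h2⟩
  | cons c cs ih =>
    simp only [List.foldl_cons]
    obtain ⟨g1, g2⟩ := pv_step_sim d st c h1 h2
    exact ih (pvInsA d c) (pvStepB st c) g1 g2

-- ===== VERDICT (by name: the statement is the Claim_ definition above) =====
theorem pick_primary_metric_spec : Claim_equal_pick_primary_metric := by
  intro cols _
  unfold Spec_pick_primary_metric pick_primary_metric pick_primary_metric_alt
  show (match pvLoopA (cols.foldl pvInsA PySem.Dict.empty) pvPreferred with
        | some v => some v
        | none => if cols ≠ [] then cols.head? else none)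
      = (if (cols.foldl pvStepB (none, pvPreferred.length)).2 < pvPreferred.length
          then (cols.foldl pvStepB (none, pvPreferred.length)).1
          else if cols ≠ [] then cols.head? else none)
  have h0 : ((none : Option String), pvPreferred.length).2
      = pvPreferred.findIdx (PySem.Dict.empty (κ := String) (ν := String)).contains := by decide
  obtain ⟨H1, H2⟩ := pv_fold_sim cols PySem.Dict.empty (none, pvPreferred.length) h0
    (fun h => absurd h (lt_irrefl _))
  rw [pv_loopA_eq]
  set d' := cols.foldl pvInsA PySem.Dict.empty with hd'
  set f := pvPreferred.findIdx d'.contains with hf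
  by_cases hlt : f < pvPreferred.length
  · have hget : pvPreferred[f]? = some pvPreferred[f] := List.getElem?_eq_getElem hlt
    have hcont : d'.contains pvPreferred[f] = true := List.findIdx_getElem (w := hlt)
    have hsome : (d'.get? pvPreferred[f]).isSome := by
      rw [← PySem.Dict.contains_eq_isSome_get?]; exact hcont
    obtain ⟨v, hv⟩ := Option.isSome_iff_exists.mp hsome
    have hkey : pvPreferred.getD f "" = pvPreferred[f] := List.getD_eq_getElem _ _ hlt
    rw [hget]
    simp only [hv, if_pos (H1 ▸ hlt)]
    rw [H2 (H1 ▸ hlt)]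
    simp only [H1, hkey, hv]
  · have hf8 : f = pvPreferred.length :=
      le_antisymm (List.findIdx_le_length) (not_lt.mp hlt)
    have hget : pvPreferred[f]? = none := List.getElem?_eq_none (by omega)
    have hnot : ¬ (cols.foldl pvStepB (none, pvPreferred.length)).2 < pvPreferred.length := by
      rw [H1]; exact hlt
    rw [hget]
    simp only [if_neg hnot]
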